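-- pv_equiv track=rewrite | github.com/kgruel/strange-loops | apps/loops/src/loops/commands/emit.py | _parse_emit_parts
-- ===== SOURCE A (Python) =====
-- def _parse_emit_parts(parts: list[str]) -> dict[str, str]:
--     """Parse emit args into a payload dict.
--
--     Any KEY=VALUE tokens become payload entries. Any trailing non-key=value
--     tokens are joined with spaces into payload["message"].
--
--     The ``ref`` key is special: repeated ``ref=X`` occurrences accumulate into
--     a single comma-separated value (matching the downstream fold convention
--     in ``_make_upsert`` / ``_make_collect``). Both ``ref=A,B`` and
--     ``ref=A ref=B`` produce the same payload. This dissolves a long-lived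
--     footgun where argparse-style dict-overwrite silently dropped all but
--     the last ``ref=`` occurrence.
--     """
--     payload: dict[str, str] = {}
--     refs_accum: list[str] = []  # preserve order; dedup-on-insert
--     message_parts: list[str] = []
--
--     for item in parts:
--         if "=" in item:
--             key, _, value = item.partition("=")
--             if key.isidentifier():
--                 if key == "ref":
--                     for r in value.split(","):
--                         r = r.strip()
--                         if r and r not in refs_accum:
--                             refs_accum.append(r)
--                     continue
--                 payload[key] = value
--                 continue
--         message_parts.append(item)
--
--     if refs_accum:
--         payload["ref"] = ",".join(refs_accum)
--     if message_parts:
--         payload["message"] = " ".join(message_parts)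
--
--     return payload
-- ===== SOURCE B (Python) =====
-- def _classify(item):
--     key, sep, value = item.partition("=")
--     if sep and key.isidentifier():
--         return ("ref", value) if key == "ref" else ("kv", (key, value))
--     return ("msg", item)
--
--
-- def _parse_emit_parts(parts):
--     tagged = [_classify(p) for p in parts]
--     payload = dict(kv for tag, kv in tagged if tag == "kv")
--     frags = [f.strip() for tag, v in tagged if tag == "ref" for f in v.split(",")]
--     frags = [f for f in frags if f]
--     if frags:
--         payload["ref"] = ",".join(dict.fromkeys(frags))
--     msgs = [v for tag, v in tagged if tag == "msg"]
--     if msgs: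
--         payload["message"] = " ".join(msgs)
--     return payload
-- ===== Notes on version B (the rewrite author's own statement) =====
-- stated objective: simpler
-- what changed: Replaces A's single loop that interleaves dict insertion, inline dedup-on-insert ref accumulation and message collection with a map that tags each token kv/ref/msg plus separate reduce steps: dict() over the kv pairs, dict.fromkeys ordered dedup of the flattened ref fragments, and one join of the messages.
import Mathlib
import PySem

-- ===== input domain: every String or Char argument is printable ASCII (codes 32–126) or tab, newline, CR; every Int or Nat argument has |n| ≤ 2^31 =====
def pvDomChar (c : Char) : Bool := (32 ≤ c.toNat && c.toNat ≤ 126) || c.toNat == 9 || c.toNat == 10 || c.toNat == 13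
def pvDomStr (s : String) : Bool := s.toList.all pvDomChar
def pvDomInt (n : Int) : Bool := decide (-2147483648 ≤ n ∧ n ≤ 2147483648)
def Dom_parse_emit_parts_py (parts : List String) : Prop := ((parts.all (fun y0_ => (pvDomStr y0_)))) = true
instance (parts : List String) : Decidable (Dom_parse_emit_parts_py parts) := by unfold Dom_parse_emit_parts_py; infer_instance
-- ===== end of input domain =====

-- B restates A as one classification pass (tagging each token kv/ref/msg) followed by
-- separate reduce steps: dict() of the kv pairs, ordered dedup (dict.fromkeys) of the
-- ref fragments, join of the message parts — objective: simpler decomposition, same cost.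

-- ===== PORT A =====
-- str.partition("="): some (before, after) at the first '=', none when '=' is absent
-- (exact: A only partitions when "=" is in the item, which is exactly the some case)
def partEq : List Char → Option (List Char × List Char)
  | [] => none
  | c :: rest =>
      if c = '=' then some ([], rest)
      else
        match partEq rest with
        | some (k, v) => some (c :: k, v)
        | none => none

-- str.isidentifier(), exact on the ASCII domain (letters, digits, '_'; non-digit start)
def pyIsIdentifier (s : String) : Bool :=
  match s.toList with
  | [] => false
  | c :: cs => (c.isAlpha || c = '_') && cs.all (fun ch => ch.isAlphanum || ch = '_')

def parse_emit_parts_py (parts : List String) : List (String × String) :=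
  let st := parts.foldl
    (fun (st : PySem.Dict String String × List String × List String) item =>
      match partEq item.toList with
      | some (k, v) =>
          let key := String.ofList k
          if pyIsIdentifier key then
            if key = "ref" then
              (st.1,
               (PySem.Chars.splitOn v [',']).foldl (fun acc rr =>
                  let r := String.ofList (PySem.Chars.strip rr)
                  if r ≠ "" ∧ r ∉ acc then acc ++ [r] else acc) st.2.1,
               st.2.2)
            else (st.1.insert key (String.ofList v), st.2.1, st.2.2)
          else (st.1, st.2.1, st.2.2 ++ [item])
      | none => (st.1, st.2.1, st.2.2 ++ [item]))
    (PySem.Dict.empty, [], [])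
  let payload := if st.2.1 ≠ [] then st.1.insert "ref" (PySem.Str.join "," st.2.1) else st.1
  let payload := if st.2.2 ≠ [] then payload.insert "message" (PySem.Str.join " " st.2.2) else payload
  payload.items

-- ===== PORT B =====
inductive EmitTok
  | kv : String → String → EmitTok
  | ref : String → EmitTok
  | msg : String → EmitTok
deriving DecidableEq, Repr

def classifyTok (item : String) : EmitTok :=
  match partEq item.toList with
  | some (k, v) =>
      let key := String.ofList k
      if pyIsIdentifier key then
        if key = "ref" then .ref (String.ofList v) else .kv key (String.ofList v)
      else .msg item
  | none => .msg item

def kvProj : EmitTok → Option (String × String)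
  | .kv k v => some (k, v)
  | _ => none

def refProj : EmitTok → Option String
  | .ref v => some v
  | _ => none

def msgProj : EmitTok → Option String
  | .msg s => some s
  | _ => none

-- the list comprehension body: [f.strip() for f in v.split(",")]
def fragsOfStr (v : String) : List String :=
  (PySem.Chars.splitOn v.toList [',']).map (fun f => String.ofList (PySem.Chars.strip f))

def parse_emit_parts_py_alt (parts : List String) : List (String × String) :=
  let tagged := parts.map classifyTok
  let payload := PySem.Dict.ofList (tagged.filterMap kvProj)
  let frags := ((tagged.filterMap refProj).flatMap fragsOfStr).filter (fun f => f ≠ "")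
  let payload := if frags ≠ [] then payload.insert "ref" (PySem.Str.join "," (PySem.List.dedup frags)) else payload
  let payload := if tagged.filterMap msgProj ≠ [] then payload.insert "message" (PySem.Str.join " " (tagged.filterMap msgProj)) else payload
  payload.items

-- ===== PRECONDITION & SPEC =====
def Spec_parse_emit_parts_py (parts : List String) (out : List (String × String)) : Prop := out = parse_emit_parts_py_alt parts
instance (parts : List String) (out : List (String × String)) : Decidable (Spec_parse_emit_parts_py parts out) := by unfold Spec_parse_emit_parts_py; infer_instance

-- ===== CLAIM (what is proved, stated in full; the proofs are below) =====
def Claim_equal_parse_emit_parts_py : Prop := ∀ (parts : List String), Dom_parse_emit_parts_py parts → Spec_parse_emit_parts_py parts (parse_emit_parts_py parts)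

-- ===== LEMMAS AND PROOFS =====

-- A's dedup-on-insert step for one stripped fragment
def insFrag (acc : List String) (r : String) : List String :=
  if r ≠ "" ∧ r ∉ acc then acc ++ [r] else acc

lemma foldl_insFrag_eq_add (l : List String) (acc : List String) :
    l.foldl insFrag acc = (l.filter (fun r => r ≠ "")).foldl PySem.Set.add acc := by
  induction l generalizing acc with
  | nil => rfl
  | cons x xs ih =>
      by_cases hx : x = ""
      · subst hx
        simp [insFrag, ih]
      · simp only [List.foldl_cons, List.filter_cons]
        rw [if_pos (by simpa using hx)]
        simp only [List.foldl_cons, ih]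
        congr 1
        by_cases hm : x ∈ acc
        · simp [insFrag, PySem.Set.add, hx, hm]
        · simp [insFrag, PySem.Set.add, hx, hm]

lemma fold_frag (v : List Char) (refs : List String) :
    (PySem.Chars.splitOn v [',']).foldl (fun acc rr =>
        let r := String.ofList (PySem.Chars.strip rr)
        if r ≠ "" ∧ r ∉ acc then acc ++ [r] else acc) refs
      = (fragsOfStr (String.ofList v)).foldl insFrag refs := by
  simp [fragsOfStr, List.foldl_map, insFrag]

lemma loopA_invariant (parts : List String)
    (d : PySem.Dict String String) (refs msgs : List String) :
    parts.foldl
      (fun (st : PySem.Dict String String × List String × List String) item =>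
        match partEq item.toList with
        | some (k, v) =>
            let key := String.ofList k
            if pyIsIdentifier key then
              if key = "ref" then
                (st.1,
                 (PySem.Chars.splitOn v [',']).foldl (fun acc rr =>
                    let r := String.ofList (PySem.Chars.strip rr)
                    if r ≠ "" ∧ r ∉ acc then acc ++ [r] else acc) st.2.1,
                 st.2.2)
              else (st.1.insert key (String.ofList v), st.2.1, st.2.2)
            else (st.1, st.2.1, st.2.2 ++ [item])
        | none => (st.1, st.2.1, st.2.2 ++ [item]))
      (d, refs, msgs)
    = (d.update ((parts.map classifyTok).filterMap kvProj),
       (((parts.map classifyTok).filterMap refProj).flatMap fragsOfStr).foldl insFrag refs,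
       msgs ++ (parts.map classifyTok).filterMap msgProj) := by
  induction parts generalizing d refs msgs with
  | nil => simp [PySem.Dict.update]
  | cons item rest ih =>
      simp only [List.foldl_cons, List.map_cons]
      rcases hp : partEq item.toList with _ | ⟨k, v⟩
      · simp only [hp, classifyTok]
        rw [ih]
        simp [msgProj, refProj, kvProj, List.append_assoc]
      · simp only [hp, classifyTok]
        by_cases hid : pyIsIdentifier (String.ofList k)
        · by_cases href : String.ofList k = "ref"
          · rw [href] at hid ⊢
            simp only [hid, if_true]
            rw [fold_frag, ih]
            simp only [List.filterMap_cons, refProj, kvProj, msgProj, List.flatMap_cons,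
              List.foldl_append]
          · simp only [hid, href, ite_true, ite_false]
            rw [ih]
            simp [kvProj, refProj, msgProj, PySem.Dict.update]
        · simp only [hid, Bool.false_eq_true, ite_false]
          rw [ih]
          simp [kvProj, refProj, msgProj, List.append_assoc]

lemma foldl_insFrag_nil (l : List String) :
    l.foldl insFrag [] = PySem.List.dedup (l.filter (fun r => r ≠ "")) := by
  rw [foldl_insFrag_eq_add, PySem.List.dedup_eq_ofList]
  rfl

lemma dedup_ne_nil_iff (l : List String) : PySem.List.dedup l ≠ [] ↔ l ≠ [] := by
  rw [not_iff_not]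
  simp [PySem.List.dedup_eq_ofList, List.eq_nil_iff_forall_not_mem, PySem.Set.mem_ofList]

-- ===== VERDICT (by name: the statement is the Claim_ definition above) =====
theorem parse_emit_parts_py_spec : Claim_equal_parse_emit_parts_py := by
  intro parts _
  unfold Spec_parse_emit_parts_py parse_emit_parts_py parse_emit_parts_py_alt
  rw [loopA_invariant, foldl_insFrag_nil]
  simp only [dedup_ne_nil_iff, List.nil_append, PySem.Dict.ofList]
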